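-- pv_equiv track=rewrite | github.com/manaswini1869/dsa101 | dailyLeetcode/Divide a String Into Groups of Size k.py | divideString
-- ===== SOURCE A (Python) =====
-- from typing import List
--
-- def divideString(s: str, k: int, fill: str) -> List[str]:
--     res = []
--     n = len(s)
--     i = 0
--     while i < n:
--         part = s[i:i+k]
--         if len(part) != k:
--             part += fill * (k - len(part))
--         res.append(part)
--         i += k
--
--     return res
-- ===== SOURCE B (Python) =====
-- from typing import List
--
-- def divideString(s: str, k: int, fill: str) -> List[str]:
--     res = []
--     cur = []
--     for ch in s:
--         cur.append(ch)
--         if len(cur) == k: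
--             res.append(''.join(cur))
--             cur = []
--     if cur:
--         res.append(''.join(cur) + fill * (k - len(cur)))
--     return res
-- ===== Notes on version B (the rewrite author's own statement) =====
-- stated objective: alternative
-- what changed: B makes a single character-by-character pass with an accumulator that is flushed whenever it reaches size k and padded once at the end, instead of A's index-arithmetic while-loop that slices k-sized substrings and pads inside the loop.
import Mathlib
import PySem

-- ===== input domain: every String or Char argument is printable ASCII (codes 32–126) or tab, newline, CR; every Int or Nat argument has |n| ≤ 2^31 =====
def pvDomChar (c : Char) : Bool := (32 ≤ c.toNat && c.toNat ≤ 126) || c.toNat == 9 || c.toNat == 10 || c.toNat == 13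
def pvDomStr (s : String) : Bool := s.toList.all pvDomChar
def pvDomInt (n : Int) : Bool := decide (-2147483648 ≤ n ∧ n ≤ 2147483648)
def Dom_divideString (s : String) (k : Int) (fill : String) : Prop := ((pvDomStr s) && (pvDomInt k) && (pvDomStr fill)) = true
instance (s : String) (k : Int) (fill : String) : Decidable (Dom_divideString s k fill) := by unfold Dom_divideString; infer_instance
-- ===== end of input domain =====

-- B replaces A's index-arithmetic slicing loop by a single character-by-character pass with an
-- accumulator flushed at size k and padded once at the end; objective: alternative.
-- (Both ports work on code-point lists; results are rebuilt with String.ofList.)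

-- ===== PORT A =====
-- A's in-loop branch: if len(part) != k: part += fill * (k - len(part))
def pvPad (fillcs : List Char) (k : Int) (part : List Char) : List Char :=
  if (part.length : Int) ≠ k then part ++ PySem.List.pyRepeat fillcs (k - (part.length : Int)) else part

-- A's while loop; fuel makes the recursion total (one unit per iteration plus the exit test;
-- with k ≥ 1 the initial fuel length+1 is never exhausted).
def pvLoopA (cs fillcs : List Char) (k : Int) (i : Int) (fuel : Nat) : List (List Char) :=
  match fuel with
  | 0 => []
  | Nat.succ f =>
    if i < (cs.length : Int) then
      pvPad fillcs k (PySem.List.slice cs (some i) (some (i + k))) :: pvLoopA cs fillcs k (i + k) f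
    else []

def divideString (s : String) (k : Int) (fill : String) : List String :=
  (pvLoopA s.toList fill.toList k 0 (s.toList.length + 1)).map String.ofList

-- ===== PORT B =====
-- B's loop body: cur.append(ch); if len(cur) == k: res.append(''.join(cur)); cur = []
def pvStepB (k : Int) (st : List (List Char) × List Char) (c : Char) : List (List Char) × List Char :=
  let cur := st.2 ++ [c]
  if (cur.length : Int) = k then (st.1 ++ [cur], []) else (st.1, cur)

-- B's final step: if cur: res.append(''.join(cur) + fill * (k - len(cur)))
def pvFinishB (fillcs : List Char) (k : Int) (st : List (List Char) × List Char) : List (List Char) :=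
  if st.2 ≠ [] then st.1 ++ [st.2 ++ PySem.List.pyRepeat fillcs (k - (st.2.length : Int))] else st.1

def divideString_alt (s : String) (k : Int) (fill : String) : List String :=
  (pvFinishB fill.toList k (s.toList.foldl (pvStepB k) ([], []))).map String.ofList

-- ===== PRECONDITION & SPEC =====
-- Pre_ excludes exactly the inputs where the Python A never returns: with k ≤ 0 and s nonempty
-- the while loop runs forever (i never advances past n).
def Pre_divideString (s : String) (k : Int) (fill : String) : Prop := 1 ≤ k ∨ s = ""
instance (s : String) (k : Int) (fill : String) : Decidable (Pre_divideString s k fill) := by unfold Pre_divideString; infer_instance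

def pvWitness_divideString : String × Int × String := ("abcdefgh", 3, "x")

def Spec_divideString (s : String) (k : Int) (fill : String) (out : List String) : Prop := out = divideString_alt s k fill
instance (s : String) (k : Int) (fill : String) (out : List String) : Decidable (Spec_divideString s k fill out) := by unfold Spec_divideString; infer_instance

-- ===== CLAIM (what is proved, stated in full; the proofs are below) =====
def Claim_equal_divideString : Prop := ∀ (s : String) (k : Int) (fill : String), Dom_divideString s k fill → Pre_divideString s k fill → Spec_divideString s k fill (divideString s k fill)

-- ===== LEMMAS AND PROOFS =====

-- If the accumulator never reaches size k while consuming cs, the fold just appends cs to it.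
theorem pvFoldB_partial (k : Int) : ∀ (cs cur : List Char) (res : List (List Char)),
    ((cur.length : Int) + cs.length < k) →
    cs.foldl (pvStepB k) (res, cur) = (res, cur ++ cs) := by
  intro cs
  induction cs with
  | nil => intro cur res _; simp
  | cons c t ih =>
      intro cur res h
      simp only [List.foldl_cons]
      have hne : ¬ (((cur ++ [c]).length : Int) = k) := by
        simp only [List.length_append, List.length_cons, List.length_nil]
        push_cast
        simp only [List.length_cons] at h
        push_cast at h
        omega
      simp only [pvStepB, if_neg hne]
      rw [ih (cur ++ [c]) res (by simp at h ⊢; omega)]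
      simp

-- Consuming one full chunk: starting from a short accumulator, the fold flushes exactly once
-- after (k - |cur|) more characters.
theorem pvFoldB_chunk (k : Int) : ∀ (cs cur : List Char) (res : List (List Char)),
    ((cur.length : Int) < k) → (k ≤ (cur.length : Int) + cs.length) →
    cs.foldl (pvStepB k) (res, cur) =
      (cs.drop (k - cur.length).toNat).foldl (pvStepB k)
        (res ++ [cur ++ cs.take (k - cur.length).toNat], []) := by
  intro cs
  induction cs with
  | nil =>
      intro cur res h1 h2
      simp only [List.length_nil, Int.natCast_zero, add_zero] at h2
      omega
  | cons c t ih =>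
      intro cur res h1 h2
      simp only [List.foldl_cons]
      by_cases hfl : (((cur ++ [c]).length : Int) = k)
      · have ht : (k - (cur.length : Int)).toNat = 1 := by
          simp only [List.length_append, List.length_cons, List.length_nil] at hfl
          push_cast at hfl; omega
        simp only [pvStepB, if_pos hfl, ht, List.take_succ_cons, List.take_zero,
          List.drop_succ_cons, List.drop_zero]
      · simp only [pvStepB, if_neg hfl]
        have hl : ((cur ++ [c]).length : Int) < k := by
          simp only [List.length_append, List.length_cons, List.length_nil] at hfl ⊢
          push_cast at hfl ⊢; omega
        rw [ih (cur ++ [c]) res hl (by simp at h2 ⊢; omega)]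
        have he : (k - ((cur : List Char).length : Int)).toNat
            = ((k - ((cur ++ [c]).length : Int)).toNat) + 1 := by
          simp only [List.length_append, List.length_cons, List.length_nil]
          push_cast; omega
        rw [he]
        simp only [List.take_succ_cons, List.drop_succ_cons]
        simp

-- Main invariant: B's fold-then-finish on the unconsumed suffix equals res ++ A's loop from i.
theorem pvMain (cs fillcs : List Char) (k : Int) (hk : 1 ≤ k) :
    ∀ (fuel : Nat) (i : Int), 0 ≤ i → ((cs.length : Int) - i < fuel) →
      ∀ (res : List (List Char)),
        pvFinishB fillcs k ((cs.drop i.toNat).foldl (pvStepB k) (res, [])) =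
          res ++ pvLoopA cs fillcs k i fuel := by
  intro fuel
  induction fuel with
  | zero =>
      intro i hi0 h res
      have hd : cs.drop i.toNat = [] := List.drop_eq_nil_of_le (by omega)
      rw [hd]
      simp [pvFinishB, pvLoopA]
  | succ f ih =>
      intro i hi0 hfuel res
      by_cases hi : i < (cs.length : Int)
      · have hdroplen : ((cs.drop i.toNat).length : Int) = (cs.length : Int) - i := by
          simp [List.length_drop]; omega
        have hslice : PySem.List.slice cs (some i) (some (i + k))
            = (cs.drop i.toNat).take k.toNat := by
          rw [PySem.List.slice_toNat cs hi0 (by omega)]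
          have he : (i + k).toNat - i.toNat = k.toNat := by omega
          rw [he]
        by_cases hfull : i + k ≤ (cs.length : Int)
        · -- full chunk: the fold flushes it, then recurse
          have hchunk := pvFoldB_chunk k (cs.drop i.toNat) [] res
            (by simp; omega) (by rw [hdroplen]; simp; omega)
          simp only [List.length_nil, Int.natCast_zero, sub_zero, List.nil_append] at hchunk
          rw [hchunk, List.drop_drop]
          have hd : i.toNat + k.toNat = (i + k).toNat := by omega
          rw [hd, ih (i + k) (by omega) (by omega)]
          have hlen : (((cs.drop i.toNat).take k.toNat).length : Int) = k := by
            simp [List.length_take, List.length_drop]; omega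
          simp only [pvLoopA, if_pos hi]
          rw [hslice]
          unfold pvPad
          rw [if_neg (fun h => h hlen)]
          simp
        · -- last, short chunk: the fold never flushes; finish pads it
          have hlt : ((cs.drop i.toNat).length : Int) < k := by omega
          have hpart := pvFoldB_partial k (cs.drop i.toNat) [] res (by simp; omega)
          rw [hpart]
          have hne : cs.drop i.toNat ≠ [] := by
            intro h
            have := congrArg List.length h
            simp [List.length_drop] at this
            omega
          have htake : (cs.drop i.toNat).take k.toNat = cs.drop i.toNat := by
            apply List.take_of_length_le; omega
          simp only [pvFinishB, List.nil_append, if_pos hne]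
          simp only [pvLoopA, if_pos hi]
          have hloop2 : pvLoopA cs fillcs k (i + k) f = [] := by
            cases f with
            | zero => rfl
            | succ f' => simp only [pvLoopA]; rw [if_neg (by omega)]
          rw [hloop2, hslice, htake]
          have hnk : ((cs.drop i.toNat).length : Int) ≠ k := by omega
          unfold pvPad
          rw [if_pos hnk]
      · have hd : cs.drop i.toNat = [] := by
          apply List.drop_eq_nil_of_le; omega
        rw [hd]
        simp only [List.foldl_nil, pvFinishB]
        simp only [pvLoopA, if_neg hi]
        simp

-- ===== VERDICT (by name: the statement is the Claim_ definition above) =====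
theorem divideString_spec : Claim_equal_divideString := by
  intro s k fill _ hpre
  unfold Spec_divideString divideString divideString_alt
  rcases hpre with hk | hempty
  · have h := pvMain s.toList fill.toList k hk (s.toList.length + 1) 0 le_rfl
      (by push_cast; omega) []
    simp only [Int.toNat_zero, List.drop_zero, List.nil_append] at h
    rw [h]
  · subst hempty
    rfl
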